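-- pv_equiv track=rewrite | github.com/akniyev/path_tracer | path_tracer.py | breakIntoComponents2
-- ===== SOURCE A (Python) =====
-- def breakIntoComponents2(coords):
--     sa = set(coords)
--
--     def removeOne(s, x, y):
--         if (x,y) in s:
--             s.remove((x, y))
--             return [(x, y)] \
--                    + removeOne(s, x - 1, y - 1) \
--                    + removeOne(s, x, y-1) \
--                    + removeOne(s, x + 1, y - 1) \
--                    + removeOne(s, x + 1, y) \
--                    + removeOne(s, x + 1, y + 1) \
--                    + removeOne(s, x, y + 1) \
--                    + removeOne(s, x - 1, y + 1) \
--                    + removeOne(s, x - 1, y)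
--         else:
--             return []
--
--     result = []
--
--     for i in coords:
--         ro = removeOne(sa, i[0], i[1])
--         if (ro != []):
--             result.append(ro)
--
--     return result
-- ===== SOURCE B (Python) =====
-- def breakIntoComponents2(coords):
--     sa = set(coords)
--     result = []
--     for i in coords:
--         comp = []
--         stack = [i]
--         while stack:
--             c = stack.pop()
--             if c in sa:
--                 sa.remove(c)
--                 comp.append(c)
--                 x, y = c
--                 # push the 8 neighbours in reverse of the recursive visiting
--                 # order, so popping explores them in the same order
--                 stack.extend([(x - 1, y), (x - 1, y + 1), (x, y + 1),
--                               (x + 1, y + 1), (x + 1, y), (x + 1, y - 1),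
--                               (x, y - 1), (x - 1, y - 1)])
--         if comp:
--             result.append(comp)
--     return result
-- ===== Notes on version B (the rewrite author's own statement) =====
-- stated objective: alternative
-- what changed: Replaces the recursive 8-way flood fill (removeOne) with an iterative explicit-stack DFS that pushes neighbours in reverse order and tests membership at pop time, producing the identical per-component pre-order without Python recursion.
import Mathlib
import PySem

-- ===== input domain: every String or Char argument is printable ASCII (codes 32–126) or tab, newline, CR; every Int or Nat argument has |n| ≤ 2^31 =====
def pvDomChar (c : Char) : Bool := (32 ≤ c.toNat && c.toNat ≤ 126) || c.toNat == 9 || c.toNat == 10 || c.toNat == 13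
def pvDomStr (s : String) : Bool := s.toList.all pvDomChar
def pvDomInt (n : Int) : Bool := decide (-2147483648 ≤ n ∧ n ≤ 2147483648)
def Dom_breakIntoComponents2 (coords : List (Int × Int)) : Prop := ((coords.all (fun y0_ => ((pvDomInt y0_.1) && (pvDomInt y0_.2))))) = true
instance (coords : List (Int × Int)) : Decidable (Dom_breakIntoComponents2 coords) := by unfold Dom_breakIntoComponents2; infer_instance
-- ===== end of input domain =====

-- B replaces A's recursive 8-way flood fill by an iterative explicit-stack DFS
-- (same return value; A's `removeOne` mutates the set `sa` in place, both ports
-- thread that set state explicitly — the equivalence is about the return value).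

set_option maxHeartbeats 4000000

-- ===== PORT A =====
-- A's neighbour order in `removeOne`'s eight recursive calls
def pvNbrs (x y : Int) : List (Int × Int) :=
  [(x-1,y-1), (x,y-1), (x+1,y-1), (x+1,y), (x+1,y+1), (x,y+1), (x-1,y+1), (x-1,y)]

-- `removeOne(s, x, y)`: the set `s` (a PySem.Set = duplicate-free list) is mutated
-- in place, so the port threads it: result = (returned list, set after the call).
-- `s.remove(c)` right after the `c in s` check is exactly `List.erase`.
-- General recursion is made structural with a fuel argument; fuel `s.length + 1`
-- is always sufficient because every recursive level first removes an element.
def pvRemoveOneF : Nat → List (Int × Int) → Int → Int → List (Int × Int) × List (Int × Int)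
  | 0, s, _, _ => ([], s)
  | f + 1, s, x, y =>
    if (x, y) ∈ s then
      let s0 := s.erase (x, y)
      let r1 := pvRemoveOneF f s0 (x - 1) (y - 1)
      let r2 := pvRemoveOneF f r1.2 x (y - 1)
      let r3 := pvRemoveOneF f r2.2 (x + 1) (y - 1)
      let r4 := pvRemoveOneF f r3.2 (x + 1) y
      let r5 := pvRemoveOneF f r4.2 (x + 1) (y + 1)
      let r6 := pvRemoveOneF f r5.2 x (y + 1)
      let r7 := pvRemoveOneF f r6.2 (x - 1) (y + 1)
      let r8 := pvRemoveOneF f r7.2 (x - 1) y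
      ((x, y) :: (r1.1 ++ (r2.1 ++ (r3.1 ++ (r4.1 ++ (r5.1 ++ (r6.1 ++ (r7.1 ++ r8.1))))))),
        r8.2)
    else ([], s)

def pvRemoveOne (s : List (Int × Int)) (x y : Int) : List (Int × Int) × List (Int × Int) :=
  pvRemoveOneF (s.length + 1) s x y

def breakIntoComponents2 (coords : List (Int × Int)) : List (List (Int × Int)) :=
  (coords.foldl
    (fun st i =>
      let ro := pvRemoveOne st.1 i.1 i.2
      if ro.1 ≠ [] then (ro.2, st.2 ++ [ro.1]) else (ro.2, st.2))
    ((PySem.Set.ofList coords : List (Int × Int)), ([] : List (List (Int × Int))))).2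

-- ===== PORT B =====
-- Source B's `while stack:` loop; the Python stack pops from the END, so it is
-- modelled top-at-head: `stack.extend(rev); stack.pop()` = push `rev.reverse`
-- in front and pop the head.  State (set, stack) ↦ (component list, final set).
def pvDfs (s : List (Int × Int)) (stack : List (Int × Int)) :
    List (Int × Int) × List (Int × Int) :=
  match stack with
  | [] => ([], s)
  | c :: st =>
    if h : c ∈ s then
      -- Source B pushes the neighbour list REVERSED and pops from the END of the
      -- Python list; with the stack modelled top-at-head this is exactly
      -- prepending the neighbours in their original order `pvNbrs`.
      ((c :: (pvDfs (s.erase c) (pvNbrs c.1 c.2 ++ st)).1),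
        (pvDfs (s.erase c) (pvNbrs c.1 c.2 ++ st)).2)
    else pvDfs s st
termination_by (s.length, stack.length)
decreasing_by
  all_goals first
  | (apply Prod.Lex.left
     rw [List.length_erase_of_mem h]
     have := List.length_pos_of_mem h; omega)
  | (apply Prod.Lex.right; simp)

def breakIntoComponents2_alt (coords : List (Int × Int)) : List (List (Int × Int)) :=
  (coords.foldl
    (fun st i =>
      let r := pvDfs st.1 [i]
      if r.1 ≠ [] then (r.2, st.2 ++ [r.1]) else (r.2, st.2))
    ((PySem.Set.ofList coords : List (Int × Int)), ([] : List (List (Int × Int))))).2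

-- ===== PRECONDITION & SPEC =====
def Spec_breakIntoComponents2 (coords : List (Int × Int)) (out : List (List (Int × Int))) : Prop := out = breakIntoComponents2_alt coords
instance (coords : List (Int × Int)) (out : List (List (Int × Int))) : Decidable (Spec_breakIntoComponents2 coords out) := by unfold Spec_breakIntoComponents2; infer_instance

-- ===== CLAIM (what is proved, stated in full; the proofs are below) =====
def Claim_equal_breakIntoComponents2 : Prop := ∀ (coords : List (Int × Int)), Dom_breakIntoComponents2 coords → Spec_breakIntoComponents2 coords (breakIntoComponents2 coords)

-- ===== LEMMAS AND PROOFS =====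

theorem pvDfs_nil (s : List (Int × Int)) : pvDfs s [] = ([], s) := by
  simp [pvDfs]

theorem pvDfs_cons_neg {s : List (Int × Int)} {c : Int × Int} (st : List (Int × Int))
    (h : ¬ c ∈ s) : pvDfs s (c :: st) = pvDfs s st := by
  rw [pvDfs]; simp [h]

theorem pvDfs_cons_pos {s : List (Int × Int)} {c : Int × Int} (st : List (Int × Int))
    (h : c ∈ s) :
    pvDfs s (c :: st) =
      ((c :: (pvDfs (s.erase c) (pvNbrs c.1 c.2 ++ st)).1),
        (pvDfs (s.erase c) (pvNbrs c.1 c.2 ++ st)).2) := by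
  rw [pvDfs]; rw [dif_pos h]

theorem pvDfs_len (s stack : List (Int × Int)) : (pvDfs s stack).2.length ≤ s.length := by
  induction s, stack using pvDfs.induct with
  | case1 s => simp [pvDfs_nil]
  | case2 s c st h ih =>
    rw [pvDfs_cons_pos st h]
    exact le_trans ih (List.length_erase_le)
  | case3 s c st h ih =>
    rw [pvDfs_cons_neg st h]
    exact ih

theorem pvDfs_append (s xs ys : List (Int × Int)) :
    pvDfs s (xs ++ ys) =
      ((pvDfs s xs).1 ++ (pvDfs (pvDfs s xs).2 ys).1,
        (pvDfs (pvDfs s xs).2 ys).2) := by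
  induction s, xs using pvDfs.induct generalizing ys with
  | case1 s => simp [pvDfs_nil]
  | case2 s c st h ih =>
    rw [List.cons_append, pvDfs_cons_pos (st ++ ys) h, pvDfs_cons_pos st h]
    rw [← List.append_assoc, ih]
    simp
  | case3 s c st h ih =>
    rw [List.cons_append, pvDfs_cons_neg (st ++ ys) h, pvDfs_cons_neg st h]
    exact ih ys

-- pvDfs s (c :: rest) split at the first element
theorem pvDfs_cons_split (s : List (Int × Int)) (c : Int × Int) (rest : List (Int × Int)) :
    pvDfs s (c :: rest) =
      ((pvDfs s [c]).1 ++ (pvDfs (pvDfs s [c]).2 rest).1,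
        (pvDfs (pvDfs s [c]).2 rest).2) :=
  pvDfs_append s [c] rest

-- running pvDfs seed by seed: proof-only reformulation used to unroll the
-- eight-neighbour stack into A's eight sequential calls
def pvDfsSeq (s : List (Int × Int)) (l : List (Int × Int)) :
    List (Int × Int) × List (Int × Int) :=
  match l with
  | [] => ([], s)
  | c :: rest =>
    ((pvDfs s [c]).1 ++ (pvDfsSeq (pvDfs s [c]).2 rest).1,
      (pvDfsSeq (pvDfs s [c]).2 rest).2)

theorem pvDfsSeq_eq (l : List (Int × Int)) : ∀ s : List (Int × Int),
    pvDfsSeq s l = pvDfs s l := by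
  induction l with
  | nil => intro s; rw [pvDfs_nil]; rfl
  | cons c rest ih =>
    intro s
    rw [pvDfs_cons_split s c rest]
    show ((pvDfs s [c]).1 ++ (pvDfsSeq (pvDfs s [c]).2 rest).1,
      (pvDfsSeq (pvDfs s [c]).2 rest).2) = _
    rw [ih]

theorem pvRemoveOneF_eq (f : Nat) : ∀ (s : List (Int × Int)) (x y : Int),
    s.length < f → pvRemoveOneF f s x y = pvDfs s [(x, y)] := by
  induction f with
  | zero => intro s x y hf; omega
  | succ f ih =>
    intro s x y hf
    by_cases h : (x, y) ∈ s
    · have hs0 : (s.erase (x, y)).length < f := by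
        rw [List.length_erase_of_mem h]
        have := List.length_pos_of_mem h; omega
      -- unfold one level of the fueled recursion and rewrite the eight calls
      rw [pvRemoveOneF]
      simp only [if_pos h]
      rw [ih _ _ _ hs0]
      rw [ih _ _ _ (lt_of_le_of_lt (pvDfs_len _ _) hs0)]
      rw [ih _ _ _ (lt_of_le_of_lt (le_trans (pvDfs_len _ _) (pvDfs_len _ _)) hs0)]
      rw [ih _ _ _ (lt_of_le_of_lt (le_trans (pvDfs_len _ _) (le_trans (pvDfs_len _ _) (pvDfs_len _ _))) hs0)]
      rw [ih _ _ _ (lt_of_le_of_lt (le_trans (pvDfs_len _ _) (le_trans (pvDfs_len _ _) (le_trans (pvDfs_len _ _) (pvDfs_len _ _)))) hs0)]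
      rw [ih _ _ _ (lt_of_le_of_lt (le_trans (pvDfs_len _ _) (le_trans (pvDfs_len _ _) (le_trans (pvDfs_len _ _) (le_trans (pvDfs_len _ _) (pvDfs_len _ _))))) hs0)]
      rw [ih _ _ _ (lt_of_le_of_lt (le_trans (pvDfs_len _ _) (le_trans (pvDfs_len _ _) (le_trans (pvDfs_len _ _) (le_trans (pvDfs_len _ _) (le_trans (pvDfs_len _ _) (pvDfs_len _ _)))))) hs0)]
      rw [ih _ _ _ (lt_of_le_of_lt (le_trans (pvDfs_len _ _) (le_trans (pvDfs_len _ _) (le_trans (pvDfs_len _ _) (le_trans (pvDfs_len _ _) (le_trans (pvDfs_len _ _) (le_trans (pvDfs_len _ _) (pvDfs_len _ _))))))) hs0)]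
      -- expand the dfs side into the same eight sequential runs
      rw [pvDfs_cons_pos [] h, List.append_nil]
      conv_rhs => rw [← pvDfsSeq_eq]
      simp [pvDfsSeq, pvNbrs]
    · rw [pvRemoveOneF]
      simp only [if_neg h]
      rw [pvDfs_cons_neg [] h, pvDfs_nil]

theorem pvRemoveOne_eq_dfs (s : List (Int × Int)) (x y : Int) :
    pvRemoveOne s x y = pvDfs s [(x, y)] :=
  pvRemoveOneF_eq (s.length + 1) s x y (Nat.lt_succ_self _)

-- ===== VERDICT (by name: the statement is the Claim_ definition above) =====
theorem breakIntoComponents2_spec : Claim_equal_breakIntoComponents2 := by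
  intro coords _
  unfold Spec_breakIntoComponents2 breakIntoComponents2 breakIntoComponents2_alt
  have hstep :
      (fun (st : List (Int × Int) × List (List (Int × Int))) (i : Int × Int) =>
        let ro := pvRemoveOne st.1 i.1 i.2
        if ro.1 ≠ [] then (ro.2, st.2 ++ [ro.1]) else (ro.2, st.2)) =
      (fun (st : List (Int × Int) × List (List (Int × Int))) (i : Int × Int) =>
        let r := pvDfs st.1 [i]
        if r.1 ≠ [] then (r.2, st.2 ++ [r.1]) else (r.2, st.2)) := by
    funext st i
    simp only [pvRemoveOne_eq_dfs]
  rw [hstep]
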